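-- pv_equiv track=rewrite | github.com/PedroMedina18/bombita-recreacion | backend/API/utils/identificador.py | edit_str
-- ===== SOURCE A (Python) =====
-- def edit_str(input_str):
--     # *Convertir la cadena de entrada a minúsculas.
--     input_str = input_str.lower()
--     # *Elimina todos los espacios de la cadena de entrada.
--     input_str = input_str.replace(' ', '_')
--     # *Dividir la cadena de entrada en una lista de palabras.
--     words = input_str.split('_')
--     # *Crea una nueva lista para almacenar las palabras editadas.
--     edited_words = []
--     # *Iterar sobre la lista de palabras.
--     for word in words:
--         # *agréguela a la lista de palabras editadas con un signo '%' a cada lado.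
--         edited_words.append('%%' + word + '%%')
--     # *Unir la lista de palabras editadas en una sola cadena.
--     edited_str = '_'.join(edited_words)
--     # *Devuelve la cadena editada.
--     return edited_str
-- ===== SOURCE B (Python) =====
-- def edit_str(input_str):
--     s = input_str.lower().replace(' ', '_')
--     return '%%' + s.replace('_', '%%_%%') + '%%'
-- ===== Notes on version B (the rewrite author's own statement) =====
-- stated objective: simpler
-- what changed: Replaces the split/loop/append/join pipeline with a single replace that inserts the wrapping sentinels at each underscore boundary, plus padding at both ends; no intermediate word list or accumulation loop.
import Mathlib
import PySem

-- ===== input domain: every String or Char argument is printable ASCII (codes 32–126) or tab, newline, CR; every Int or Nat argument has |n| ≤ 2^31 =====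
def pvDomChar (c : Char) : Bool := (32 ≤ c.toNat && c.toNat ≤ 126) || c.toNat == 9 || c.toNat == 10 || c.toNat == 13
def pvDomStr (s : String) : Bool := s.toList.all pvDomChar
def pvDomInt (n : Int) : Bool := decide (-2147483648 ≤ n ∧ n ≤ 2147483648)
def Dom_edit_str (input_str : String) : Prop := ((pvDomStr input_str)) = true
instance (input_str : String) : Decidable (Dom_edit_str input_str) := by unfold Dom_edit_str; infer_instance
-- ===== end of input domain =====

-- B replaces A's split/loop/join pipeline with one replace('_','%%_%%') plus '%%' padding at both ends (simpler decomposition, same cost).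


-- ===== PORT A =====
-- input_str.lower(); .replace(' ','_'); .split('_'); loop appending '%%'+word+'%%'; '_'.join(...)
def edit_str (input_str : String) : String :=
  let s1 : List Char := PySem.Chars.lower input_str.toList
  let s2 : List Char := PySem.Chars.replace s1 [' '] ['_']
  let words : List (List Char) := PySem.Chars.splitOn s2 ['_']
  let edited_words : List (List Char) :=
    words.foldl (fun acc w => acc ++ [['%', '%'] ++ w ++ ['%', '%']]) []
  String.ofList (PySem.Chars.join ['_'] edited_words)

-- ===== PORT B =====
-- '%%' + input_str.lower().replace(' ','_').replace('_','%%_%%') + '%%'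
def edit_str_alt (input_str : String) : String :=
  let s : List Char := PySem.Chars.replace (PySem.Chars.lower input_str.toList) [' '] ['_']
  String.ofList (['%', '%'] ++ PySem.Chars.replace s ['_'] ['%', '%', '_', '%', '%'] ++ ['%', '%'])

-- ===== PRECONDITION & SPEC =====
def Spec_edit_str (input_str : String) (out : String) : Prop := out = edit_str_alt input_str
instance (input_str : String) (out : String) : Decidable (Spec_edit_str input_str out) := by unfold Spec_edit_str; infer_instance

-- ===== CLAIM (what is proved, stated in full; the proofs are below) =====
def Claim_equal_edit_str : Prop := ∀ (input_str : String), Dom_edit_str input_str → Spec_edit_str input_str (edit_str input_str)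

-- ===== LEMMAS AND PROOFS =====

-- simple-recursion characterisation of split('_') (A's side)
def splitAux : List Char → List Char → List (List Char)
  | [], cur => [cur.reverse]
  | c :: t, cur => if c = '_' then cur.reverse :: splitAux t [] else splitAux t (c :: cur)

-- simple-recursion characterisation of replace('_','%%_%%') (B's side)
def repAux : List Char → List Char
  | [] => []
  | c :: t => if c = '_' then ['%', '%', '_', '%', '%'] ++ repAux t else c :: repAux t

theorem splitOn_go_eq (fuel : Nat) : ∀ (l cur : List Char) (acc : List (List Char)),
    l.length + 1 ≤ fuel →
    PySem.Chars.splitOn.go ['_'] fuel l cur acc = acc.reverse ++ splitAux l cur := by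
  induction fuel with
  | zero => intro l cur acc h; omega
  | succ n ih =>
    intro l cur acc h
    cases l with
    | nil => simp [PySem.Chars.splitOn.go, splitAux]
    | cons c t =>
      rw [PySem.Chars.splitOn.go]
      by_cases hc : c = '_'
      · subst hc
        simp only [List.isPrefixOf, beq_self_eq_true, Bool.true_and,
          if_true, List.length_cons, List.length_nil, List.drop_succ_cons, List.drop_zero]
        rw [ih t [] (cur.reverse :: acc) (by simp at h ⊢; omega)]
        simp [splitAux]
      · rw [if_neg (by simp [List.isPrefixOf]; exact fun h' => hc h'.symm)]
        rw [ih t (c :: cur) acc (by simp at h ⊢; omega)]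
        simp [splitAux, hc]

theorem replace_go_eq (fuel : Nat) : ∀ (l acc : List Char), l.length ≤ fuel →
    PySem.Chars.replace.go ['_'] ['%', '%', '_', '%', '%'] fuel l acc = acc.reverse ++ repAux l := by
  induction fuel with
  | zero =>
    intro l acc h
    cases l with
    | nil => simp [PySem.Chars.replace.go, repAux]
    | cons c t => simp at h
  | succ n ih =>
    intro l acc h
    cases l with
    | nil => simp [PySem.Chars.replace.go, repAux]
    | cons c t =>
      rw [PySem.Chars.replace.go]
      by_cases hc : c = '_'
      · subst hc
        simp only [List.isPrefixOf, beq_self_eq_true, Bool.true_and,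
          if_true, List.length_cons, List.length_nil, List.drop_succ_cons, List.drop_zero]
        rw [ih t _ (by simp at h ⊢; omega)]
        simp [repAux]
      · rw [if_neg (by simp [List.isPrefixOf]; exact fun h' => hc h'.symm)]
        rw [ih t (c :: acc) (by simp at h ⊢; omega)]
        simp [repAux, hc]

theorem splitAux_ne_nil (l cur : List Char) : splitAux l cur ≠ [] := by
  induction l generalizing cur with
  | nil => simp [splitAux]
  | cons c t ih =>
    simp only [splitAux]
    split_ifs <;> simp [ih]

-- the heart of the equivalence: wrapping every split piece and joining with '_'
-- is the end-padded '_'→'%%_%%' substitution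
theorem join_wrap_splitAux (l : List Char) : ∀ cur : List Char,
    PySem.Chars.join ['_'] ((splitAux l cur).map (fun w => ['%', '%'] ++ w ++ ['%', '%'])) =
      ['%', '%'] ++ cur.reverse ++ repAux l ++ ['%', '%'] := by
  induction l with
  | nil => intro cur; simp [splitAux, repAux, PySem.Chars.join_singleton]
  | cons c t ih =>
    intro cur
    by_cases hc : c = '_'
    · subst hc
      simp only [splitAux, repAux, if_true]
      obtain ⟨b, bs, hb⟩ : ∃ b bs, splitAux t [] = b :: bs := by
        cases hs : splitAux t [] with
        | nil => exact absurd hs (splitAux_ne_nil t [])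
        | cons b bs => exact ⟨b, bs, rfl⟩
      have := ih ([] : List Char)
      rw [hb] at this ⊢
      simp only [List.map_cons, PySem.Chars.join_cons_cons] at this ⊢
      rw [this]
      simp
    · simp only [splitAux, repAux, hc, if_false]
      rw [ih (c :: cur)]
      simp

theorem edit_str_eq_alt (input_str : String) : edit_str input_str = edit_str_alt input_str := by
  unfold edit_str edit_str_alt
  simp only []
  set s2 : List Char := PySem.Chars.replace (PySem.Chars.lower input_str.toList) [' '] ['_'] with hs2
  congr 1
  rw [PySem.List.foldl_append_singleton_eq_map]
  show PySem.Chars.join ['_']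
      ((PySem.Chars.splitOn s2 ['_']).map (fun w => ['%', '%'] ++ w ++ ['%', '%'])) = _
  rw [PySem.Chars.splitOn, splitOn_go_eq (s2.length + 1) s2 [] [] (le_refl _)]
  rw [show PySem.Chars.replace s2 ['_'] ['%', '%', '_', '%', '%'] =
        PySem.Chars.replace.go ['_'] ['%', '%', '_', '%', '%'] s2.length s2 [] by
      rw [PySem.Chars.replace]; rfl]
  rw [replace_go_eq s2.length s2 [] (le_refl _)]
  simpa using join_wrap_splitAux s2 []

-- ===== VERDICT (by name: the statement is the Claim_ definition above) =====
theorem edit_str_spec : Claim_equal_edit_str := by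
  intro input_str _
  unfold Spec_edit_str
  exact edit_str_eq_alt input_str
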